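-- pv_equiv track=rewrite | github.com/bishwast/Python_Projects | algorithmic_ex/digit_sum_problem.py | sum_of_num_in_digit
-- ===== SOURCE A (Python) =====
-- def sum_of_num_in_digit(digit_set, N, count):
--     """
--     :param digit_set: Set of digit
--     :param N: Number in a given digit_set
--     :param count: determines how many times the process of counting ie repeated
--     :return: sum of digits in a N-number of digit
--     """
--     total_sum = 0
--
--     for i in range(count):
--         current_number =0
--         for n in range(N):
--             # Iterate through the digit_set and add them
--             for d in digit_set:
--                 current_number += d * (10**(N-1))
--         total_sum += current_number
--     return total_sum
-- ===== SOURCE B (Python) =====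
-- def sum_of_num_in_digit(digit_set, N, count):
--     if count <= 0 or N <= 0:
--         return 0
--     return count * N * sum(digit_set) * 10 ** (N - 1)
-- ===== Notes on version B (the rewrite author's own statement) =====
-- stated objective: faster
-- what changed: Replaced the three nested loops by the closed form count*N*sum(digit_set)*10**(N-1) (0 when count or N is non-positive), since every inner iteration adds the same constant.
import Mathlib
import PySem

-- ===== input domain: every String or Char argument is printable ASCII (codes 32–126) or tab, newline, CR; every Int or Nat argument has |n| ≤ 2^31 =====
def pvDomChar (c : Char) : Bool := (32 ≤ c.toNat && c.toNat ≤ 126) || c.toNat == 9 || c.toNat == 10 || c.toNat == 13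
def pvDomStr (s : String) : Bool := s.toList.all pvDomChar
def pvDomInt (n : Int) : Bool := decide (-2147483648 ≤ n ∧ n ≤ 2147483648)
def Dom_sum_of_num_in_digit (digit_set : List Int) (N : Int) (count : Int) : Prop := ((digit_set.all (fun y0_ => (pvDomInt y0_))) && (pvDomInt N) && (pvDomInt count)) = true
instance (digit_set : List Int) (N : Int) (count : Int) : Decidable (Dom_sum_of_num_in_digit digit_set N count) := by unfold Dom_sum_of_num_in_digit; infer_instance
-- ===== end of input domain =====

-- ===== PORT A =====
-- B replaces A's triple loop by a closed form; proved equal on all inputs (faster in a timing run).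
def sum_of_num_in_digit (digit_set : List Int) (N : Int) (count : Int) : Int :=
  (PySem.List.pyRange 0 count 1).foldl (fun total_sum _i =>
    let current_number : Int :=
      (PySem.List.pyRange 0 N 1).foldl (fun c _n =>
        digit_set.foldl (fun c d => c + d * 10 ^ (N - 1).toNat) c) 0
    total_sum + current_number) 0

-- ===== PORT B =====
def sum_of_num_in_digit_alt (digit_set : List Int) (N : Int) (count : Int) : Int :=
  if count ≤ 0 ∨ N ≤ 0 then 0
  else count * N * digit_set.sum * 10 ^ (N - 1).toNat

-- ===== PRECONDITION & SPEC =====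
def Spec_sum_of_num_in_digit (digit_set : List Int) (N : Int) (count : Int) (out : Int) : Prop := out = sum_of_num_in_digit_alt digit_set N count
instance (digit_set : List Int) (N : Int) (count : Int) (out : Int) : Decidable (Spec_sum_of_num_in_digit digit_set N count out) := by unfold Spec_sum_of_num_in_digit; infer_instance

-- ===== CLAIM (what is proved, stated in full; the proofs are below) =====
def Claim_equal_sum_of_num_in_digit : Prop := ∀ (digit_set : List Int) (N : Int) (count : Int), Dom_sum_of_num_in_digit digit_set N count → Spec_sum_of_num_in_digit digit_set N count (sum_of_num_in_digit digit_set N count)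

-- ===== LEMMAS AND PROOFS =====
lemma digit_fold (digit_set : List Int) (p c : Int) :
    digit_set.foldl (fun c d => c + d * p) c = c + digit_set.sum * p := by
  rw [PySem.List.foldl_add]
  induction digit_set with
  | nil => simp
  | cons x xs ih => simp at ih ⊢; linarith

lemma const_fold (l : List Int) (k : Int) :
    l.foldl (fun (c : Int) (_ : Int) => c + k) 0 = l.length * k := by
  rw [PySem.List.foldl_add]
  simp

-- ===== VERDICT (by name: the statement is the Claim_ definition above) =====
theorem sum_of_num_in_digit_spec : Claim_equal_sum_of_num_in_digit := by
  intro digit_set N count _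
  unfold Spec_sum_of_num_in_digit sum_of_num_in_digit sum_of_num_in_digit_alt
  simp only [digit_fold, const_fold, PySem.List.length_pyRange_one, sub_zero]
  by_cases hc : count ≤ 0
  · have : count.toNat = 0 := by omega
    simp [this, hc]
  · by_cases hN : N ≤ 0
    · have : N.toNat = 0 := by omega
      simp [this, hN, hc]
    · rw [Int.toNat_of_nonneg (by omega : (0:Int) ≤ count),
        Int.toNat_of_nonneg (by omega : (0:Int) ≤ N)]
      simp [hc, hN]
      ring
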